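-- pv_equiv track=rewrite | github.com/GitMonsters/octotetrahedral-agi | core/primitives.py | p_gravity_right
-- ===== SOURCE A (Python) =====
-- from typing import List, Dict, Tuple, Optional, Callable, Any, Set
-- from collections import Counter
--
-- Grid = List[List[int]]
--
-- def p_gravity_right(grid: Grid) -> Grid:
--     rows, cols = len(grid), len(grid[0])
--     bg = _bg(grid)
--     result = [[bg]*cols for _ in range(rows)]
--     for r in range(rows):
--         vals = [grid[r][c] for c in range(cols) if grid[r][c] != bg]
--         for i, v in enumerate(vals):
--             result[r][cols - len(vals) + i] = v
--     return result
--
-- def _bg(grid: Grid) -> int: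
--     counts = Counter(c for row in grid for c in row)
--     return counts.most_common(1)[0][0] if counts else 0
-- ===== SOURCE B (Python) =====
-- from collections import Counter
--
-- Grid = list
--
-- def _bg(grid):
--     counts = Counter(c for row in grid for c in row)
--     return counts.most_common(1)[0][0] if counts else 0
--
-- def p_gravity_right(grid):
--     rows, cols = len(grid), len(grid[0])
--     bg = _bg(grid)
--     return [sorted([grid[r][c] for c in range(cols)], key=lambda x: x != bg)
--             for r in range(rows)]
-- ===== Notes on version B (the rewrite author's own statement) =====
-- stated objective: idiomatic
-- what changed: A gathers each row's non-background cells and index-places them into a pre-built background row; B builds each output row in one expression as a stable sort of the row by the boolean key x != bg, whose stability partitions background cells left and non-background cells right in original order.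
import Mathlib
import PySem

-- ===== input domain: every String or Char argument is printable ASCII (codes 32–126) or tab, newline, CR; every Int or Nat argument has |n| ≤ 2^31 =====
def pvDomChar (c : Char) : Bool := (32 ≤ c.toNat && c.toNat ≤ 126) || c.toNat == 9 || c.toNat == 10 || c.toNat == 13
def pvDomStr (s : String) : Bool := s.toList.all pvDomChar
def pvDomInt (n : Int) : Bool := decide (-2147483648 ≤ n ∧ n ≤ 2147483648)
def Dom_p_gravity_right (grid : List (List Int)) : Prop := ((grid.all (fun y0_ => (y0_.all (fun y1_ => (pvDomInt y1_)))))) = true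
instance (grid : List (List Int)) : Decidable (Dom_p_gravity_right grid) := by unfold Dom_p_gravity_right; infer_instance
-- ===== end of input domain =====

-- B replaces A's gather-then-index-place per row by a stable-sort partition (sorted with key x != bg); objective: idiomatic.

-- ===== PORT A =====
-- _bg: Counter over all cells; most_common(1)[0][0] = head of the items stably sorted by count, reverse=True.
-- Shared verbatim by A and B (Source B keeps _bg unchanged).
def pvBg (grid : List (List Int)) : Int :=
  let counts := PySem.Dict.counter (grid.flatMap (fun row => row))
  if counts.items.isEmpty then 0
  else
    match PySem.List.sorted counts.items (fun kv => kv.2) true with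
    | kv :: _ => kv.1
    | [] => 0

def p_gravity_right (grid : List (List Int)) : List (List Int) :=
  let rows : Int := grid.length
  let cols : Nat := ((PySem.List.pyGet? grid 0).getD []).length  -- grid[0]; Pre_ excludes the empty grid (IndexError)
  let bg := pvBg grid
  let result := (PySem.List.pyRange 0 rows 1).map (fun _ => List.replicate cols bg)
  (PySem.List.pyRange 0 rows 1).foldl (fun res r =>
    let vals := (PySem.List.pyRange 0 (cols : Int) 1).foldl (fun acc c =>
      if PySem.List.pyGetD (PySem.List.pyGetD grid r []) c 0 ≠ bg then
        acc ++ [PySem.List.pyGetD (PySem.List.pyGetD grid r []) c 0]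
      else acc) []
    let newRow := (PySem.List.enumerate vals).foldl (fun row iv =>
      PySem.List.pySetD row ((cols : Int) - (vals.length : Int) + iv.1) iv.2)
      (PySem.List.pyGetD res r [])
    PySem.List.pySetD res r newRow) result

-- ===== PORT B =====
def p_gravity_right_alt (grid : List (List Int)) : List (List Int) :=
  let rows : Int := grid.length
  let cols : Nat := ((PySem.List.pyGet? grid 0).getD []).length
  let bg := pvBg grid
  (PySem.List.pyRange 0 rows 1).map (fun r =>
    PySem.List.sorted
      ((PySem.List.pyRange 0 (cols : Int) 1).map (fun c =>
        PySem.List.pyGetD (PySem.List.pyGetD grid r []) c 0))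
      (fun x => decide (x ≠ bg)) false)

-- ===== PRECONDITION & SPEC =====
-- Pre_ excludes exactly the inputs on which A raises IndexError: the empty grid (grid[0])
-- and ragged grids with some row shorter than the first row (grid[r][c]).  B raises there too.
def Pre_p_gravity_right (grid : List (List Int)) : Prop :=
  grid ≠ [] ∧ ∀ row ∈ grid, (grid.headD []).length ≤ row.length
instance (grid : List (List Int)) : Decidable (Pre_p_gravity_right grid) := by
  unfold Pre_p_gravity_right; infer_instance

def pvWitness_p_gravity_right : List (List Int) := [[1, 0, 1], [0, 2, 0]]

def Spec_p_gravity_right (grid : List (List Int)) (out : List (List Int)) : Prop := out = p_gravity_right_alt grid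
instance (grid : List (List Int)) (out : List (List Int)) : Decidable (Spec_p_gravity_right grid out) := by unfold Spec_p_gravity_right; infer_instance

-- ===== CLAIM (what is proved, stated in full; the proofs are below) =====
def Claim_equal_p_gravity_right : Prop := ∀ (grid : List (List Int)), Dom_p_gravity_right grid → Pre_p_gravity_right grid → Spec_p_gravity_right grid (p_gravity_right grid)

-- ===== LEMMAS AND PROOFS =====

theorem pv_insertBy_partition {α : Type} (key : α → Bool) (x : α) (as bs : List α)
    (ha : ∀ a ∈ as, key a = false) (hb : ∀ b ∈ bs, key b = true) :
    PySem.List.insertBy (fun a b => decide (key a < key b)) x (as ++ bs) =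
      if key x then as ++ bs ++ [x] else as ++ x :: bs := by
  induction as with
  | nil =>
    simp only [List.nil_append]
    by_cases hx : key x
    · simp only [hx]
      apply PySem.List.insertBy_of_forall_not_before
      intro y _
      simp [Bool.lt_iff, hx]
    · simp only [hx]
      cases bs with
      | nil => simp [PySem.List.insertBy]
      | cons b bs' =>
        have hkb : key b = true := hb b (List.mem_cons_self ..)
        simp [PySem.List.insertBy, Bool.lt_iff, hkb, Bool.eq_false_iff.mpr hx]
  | cons a as' ih =>
    have hka : key a = false := ha a (List.mem_cons_self ..)
    have : ¬ (key x < key a) := by simp [Bool.lt_iff, hka]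
    simp only [List.cons_append, PySem.List.insertBy, decide_eq_true_eq, this, if_neg,
      not_false_iff]
    rw [ih (fun a h => ha a (List.mem_cons_of_mem _ h))]
    by_cases hx : key x <;> simp [hx]

theorem pv_foldl_partition {α : Type} (key : α → Bool) (xs : List α) :
    ∀ (as bs : List α), (∀ a ∈ as, key a = false) → (∀ b ∈ bs, key b = true) →
    xs.foldl (fun acc x => PySem.List.insertBy (fun a b => decide (key a < key b)) x acc) (as ++ bs)
      = (as ++ xs.filter (fun x => !(key x))) ++ (bs ++ xs.filter key) := by
  induction xs with
  | nil => intro as bs _ _; simp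
  | cons x xs ih =>
    intro as bs ha hb
    simp only [List.foldl_cons]
    rw [pv_insertBy_partition key x as bs ha hb]
    by_cases hx : key x
    · rw [if_pos hx, List.append_assoc as bs [x]]
      rw [ih as (bs ++ [x]) ha (by intro b h; rcases List.mem_append.mp h with h | h
                                   · exact hb b h
                                   · simp at h; subst h; exact hx)]
      simp [hx]
    · rw [if_neg hx]
      have : as ++ x :: bs = (as ++ [x]) ++ bs := by simp
      rw [this, ih (as ++ [x]) bs (by intro a h; rcases List.mem_append.mp h with h | h
                                      · exact ha a h
                                      · simp at h; subst h; exact Bool.eq_false_iff.mpr hx) hb]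
      simp [hx]

theorem pv_sorted_bool_partition {α : Type} (key : α → Bool) (xs : List α) :
    PySem.List.sorted xs key false = xs.filter (fun x => !(key x)) ++ xs.filter key := by
  rw [PySem.List.sorted_eq_foldl_insertBy]
  have := pv_foldl_partition key xs [] [] (by simp) (by simp)
  simpa using this

theorem pv_setRun (C : Int) (vs : List Int) : ∀ (t : Int) (pre rest : List Int),
    rest.length = vs.length → C + t = pre.length →
    (PySem.List.enumerate vs t).foldl
      (fun row iv => PySem.List.pySetD row (C + iv.1) iv.2) (pre ++ rest) = pre ++ vs := by
  induction vs with
  | nil =>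
    intro t pre rest hlen _
    rw [List.length_eq_zero_iff.mp hlen]
    simp [PySem.List.enumerate]
  | cons v vs ih =>
    intro t pre rest hlen hC
    cases rest with
    | nil => simp at hlen
    | cons r0 rest' =>
      rw [PySem.List.enumerate_cons]
      simp only [List.foldl_cons]
      have h1 : C + t = (pre.length : Int) := hC
      rw [h1, PySem.List.pySetD_natCast]
      have h2 : (pre ++ r0 :: rest').set pre.length v = (pre ++ [v]) ++ rest' := by
        simp
      rw [h2, ih (t + 1) (pre ++ [v]) rest' (by simpa using hlen) (by simp; omega)]
      simp

theorem pv_outer (F : Int → List Int → List Int) (base : List Int) :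
    ∀ (m i : Nat) (done : List (List Int)), done.length = i →
    (PySem.List.pyRange (i : Int) ((i + m : Nat) : Int) 1).foldl
      (fun res r => PySem.List.pySetD res r (F r (PySem.List.pyGetD res r [])))
      (done ++ List.replicate m base)
    = done ++ List.map (fun (j : Nat) => F ((i : Int) + (j : Int)) base) (List.range m) := by
  intro m
  induction m with
  | zero =>
    intro i done _
    simp [PySem.List.pyRange]
  | succ m ih =>
    intro i done hlen
    have hlt : (i : Int) < ((i + (m+1) : Nat) : Int) := by push_cast; omega
    rw [PySem.List.pyRange_one_cons hlt]
    simp only [List.foldl_cons, List.replicate_succ]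
    have hget : PySem.List.pyGetD (done ++ base :: List.replicate m base) (i : Int) [] = base := by
      rw [PySem.List.pyGetD_natCast, ← hlen]
      simp
    have hset : PySem.List.pySetD (done ++ base :: List.replicate m base) (i : Int)
        (F (i : Int) base) = (done ++ [F (i : Int) base]) ++ List.replicate m base := by
      rw [PySem.List.pySetD_natCast, ← hlen]
      simp
    rw [hget, hset]
    have hcast : ((i + (m+1) : Nat) : Int) = (((i+1) + m : Nat) : Int) := by push_cast; omega
    have hi1 : ((i : Int) + 1) = (((i+1 : Nat)) : Int) := by push_cast; omega
    rw [hcast, hi1, ih (i+1) (done ++ [F (i : Int) base]) (by simp [hlen])]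
    rw [List.range_succ_eq_map]
    simp only [List.map_cons, List.map_map, Nat.cast_zero, Int.add_zero,
      List.append_assoc, List.singleton_append]
    congr 2
    apply List.map_congr_left
    intro j _
    simp only [Function.comp_apply]
    congr 1
    push_cast; omega

theorem pv_length_filter_not {α : Type} (p : α → Bool) (T : List α) :
    (T.filter p).length + (T.filter (fun x => !p x)).length = T.length := by
  induction T with
  | nil => rfl
  | cons x xs ih => by_cases h : p x <;> simp [h] <;> omega

theorem pv_filter_not_replicate (bg : Int) (T : List Int) :
    T.filter (fun x => !(decide (x ≠ bg))) =
      List.replicate (T.length - (T.filter (fun x => decide (x ≠ bg))).length) bg := by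
  apply List.eq_replicate_iff.mpr
  constructor
  · have := pv_length_filter_not (fun x => decide (x ≠ bg)) T
    omega
  · intro b hb
    have := List.of_mem_filter hb
    simpa using this


-- ===== VERDICT (by name: the statement is the Claim_ definition above) =====
theorem p_gravity_right_spec : Claim_equal_p_gravity_right := by
  intro grid _ _
  unfold Spec_p_gravity_right p_gravity_right p_gravity_right_alt
  dsimp only
  rw [show List.map (fun _ => List.replicate ((PySem.List.pyGet? grid 0).getD []).length (pvBg grid))
        (PySem.List.pyRange 0 (grid.length : Int)) =
      List.replicate grid.length
        (List.replicate ((PySem.List.pyGet? grid 0).getD []).length (pvBg grid)) by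
    rw [PySem.List.pyRange_zero_natCast]; simp [Function.comp_def]]
  have houter := pv_outer
    (fun r cur => List.foldl
      (fun row iv => PySem.List.pySetD row
        ((((PySem.List.pyGet? grid 0).getD []).length : Int) -
          ((List.foldl (fun acc c =>
              if PySem.List.pyGetD (PySem.List.pyGetD grid r []) c 0 ≠ pvBg grid then
                acc ++ [PySem.List.pyGetD (PySem.List.pyGetD grid r []) c 0]
              else acc) [] (PySem.List.pyRange 0 (((PySem.List.pyGet? grid 0).getD []).length : Int))).length : Int)
          + iv.1) iv.2)
      cur
      (PySem.List.enumerate (List.foldl (fun acc c =>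
          if PySem.List.pyGetD (PySem.List.pyGetD grid r []) c 0 ≠ pvBg grid then
            acc ++ [PySem.List.pyGetD (PySem.List.pyGetD grid r []) c 0]
          else acc) [] (PySem.List.pyRange 0 (((PySem.List.pyGet? grid 0).getD []).length : Int)))))
    (List.replicate ((PySem.List.pyGet? grid 0).getD []).length (pvBg grid))
    grid.length 0 [] rfl
  simp only [Nat.cast_zero, List.nil_append, zero_add] at houter
  rw [houter]
  rw [PySem.List.pyRange_zero_natCast grid.length]
  rw [List.map_map]
  apply List.map_congr_left
  intro j hj
  simp only [Function.comp_apply]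
  have hfq : (fun c : Int => decide (PySem.List.pyGetD (PySem.List.pyGetD grid (j : Int) []) c 0 ≠ pvBg grid))
      = ((fun v : Int => decide (v ≠ pvBg grid)) ∘ (fun c : Int => PySem.List.pyGetD (PySem.List.pyGetD grid (j : Int) []) c 0)) := rfl
  have hvals : List.foldl (fun acc c =>
        if PySem.List.pyGetD (PySem.List.pyGetD grid (j : Int) []) c 0 ≠ pvBg grid then
          acc ++ [PySem.List.pyGetD (PySem.List.pyGetD grid (j : Int) []) c 0]
        else acc) []
        (PySem.List.pyRange 0 (((PySem.List.pyGet? grid 0).getD []).length : Int))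
      = (List.map (fun c => PySem.List.pyGetD (PySem.List.pyGetD grid (j : Int) []) c 0)
          (PySem.List.pyRange 0 (((PySem.List.pyGet? grid 0).getD []).length : Int))).filter
          (fun v => decide (v ≠ pvBg grid)) := by
    rw [PySem.List.foldl_append_ite]
    rw [List.nil_append, hfq, ← List.filter_map]
  rw [hvals]
  set bg := pvBg grid with hbg
  set cols := ((PySem.List.pyGet? grid 0).getD []).length with hcols
  set T := List.map (fun c => PySem.List.pyGetD (PySem.List.pyGetD grid (j : Int) []) c 0)
      (PySem.List.pyRange 0 (cols : Int)) with hT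
  set k := (T.filter (fun v => decide (v ≠ bg))).length with hk
  have hTlen : T.length = cols := by rw [hT, PySem.List.pyRange_zero_natCast]; simp
  have hkle : k ≤ cols := by
    have := List.length_filter_le (fun v => decide (v ≠ bg)) T
    omega
  rw [show List.replicate cols bg = List.replicate (cols - k) bg ++ List.replicate k bg by
    rw [← List.replicate_add]; congr 1; omega]
  rw [pv_setRun ((cols : Int) - (k : Int)) (T.filter (fun v => decide (v ≠ bg))) 0
    (List.replicate (cols - k) bg) (List.replicate k bg) (by simp [hk]) (by simp; omega)]
  rw [pv_sorted_bool_partition (fun x => decide (x ≠ bg)) T]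
  rw [pv_filter_not_replicate bg T, hTlen, ← hk]
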